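-- pv_equiv track=rewrite | github.com/Haydn389/Python | 03온라인저지/00SW_JUNGLE/Week03/2_5639/2_5639_이진검색트리_jh.py | get_post_order
-- ===== SOURCE A (Python) =====
-- from typing import Sequence
--
-- def get_post_order(nums:Sequence) -> Sequence:
--     length = len(nums)      # nums의 길이 저장
--     if length <= 1:         # nums가 leaf면 바로 반환
--         # return
--         return nums
--     for i in range(1, length):  # 1부터 시작하는 이유: 0은 root이기 때문에 후위 순회에서는 마지막에 출력이라 빼줌.
--         if nums[i] > nums[0]:   # 오른쪽 서브트리인 경우를 찾으면 분리 시킴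
--             return get_post_order(nums[1:i]) + get_post_order(nums[i:]) + [nums[0]]
--     # 여기는 이제 오른쪽 서브트리가 없는 경우에는 왼쪽 서브트리만 보내면 되서.
--     return get_post_order(nums[1:]) + [nums[0]]
-- ===== SOURCE B (Python) =====
-- def get_post_order(nums):
--     # One-pass stack of (node, bound) pairs; bound None means +infinity.
--     out = []
--     stack = []
--     for x in nums:
--         while stack and stack[-1][1] is not None and x > stack[-1][1]:
--             out.append(stack.pop()[0])
--         if not stack:
--             bound = None
--         elif x > stack[-1][0]:
--             bound = stack[-1][1]
--         else:
--             bound = stack[-1][0]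
--         stack.append((x, bound))
--     while stack:
--         out.append(stack.pop()[0])
--     return out
-- ===== Notes on version B (the rewrite author's own statement) =====
-- stated objective: faster
-- what changed: replaced A's recursive scan-and-slice reconstruction (each level rescans and copies its slice) by a single left-to-right pass over the input that maintains an explicit stack of (node, bound) pairs and emits each node in post-order when an element exceeding its bound arrives
import Mathlib
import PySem

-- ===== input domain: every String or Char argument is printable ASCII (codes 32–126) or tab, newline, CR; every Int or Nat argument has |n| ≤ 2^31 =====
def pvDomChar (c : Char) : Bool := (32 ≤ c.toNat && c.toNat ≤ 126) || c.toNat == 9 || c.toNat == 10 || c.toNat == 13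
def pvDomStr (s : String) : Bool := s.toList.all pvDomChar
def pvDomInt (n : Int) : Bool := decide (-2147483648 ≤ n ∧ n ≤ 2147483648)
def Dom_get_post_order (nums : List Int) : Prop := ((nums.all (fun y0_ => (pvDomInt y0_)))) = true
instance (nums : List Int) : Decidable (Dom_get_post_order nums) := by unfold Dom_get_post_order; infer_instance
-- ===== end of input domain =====

-- B replaces A's recursive scan-and-slice reconstruction by a single left-to-right pass with an
-- explicit stack of (node, bound) pairs (objective: faster, O(n) instead of O(n^2)).

-- ===== PORT A =====
-- the 'for i in range(1, length): if nums[i] > nums[0]: return …' scan: first index i ≥ 1 with nums[i] > nums[0]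
-- (indices are always in range here, so nums[i] is List.getD i 0 — exact)
def pvFindGtA (nums : List Int) (i : Nat) : Option Nat :=
  if h : i < nums.length then
    if nums.getD 0 0 < nums.getD i 0 then some i else pvFindGtA nums (i + 1)
  else none
termination_by nums.length - i

-- fuel = list length + 1 (every recursive call gets a strictly shorter list, so the 0 case is unreachable)
def pvGoA : Nat → List Int → List Int
  | 0, _ => []
  | f + 1, nums =>
    if nums.length ≤ 1 then nums
    else
      match pvFindGtA nums 1 with
      | some i =>
          pvGoA f (PySem.List.slice nums (some 1) (some (i : Int))) ++
          pvGoA f (PySem.List.slice nums (some (i : Int)) none) ++ [nums.getD 0 0]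
      | none => pvGoA f (PySem.List.slice nums (some 1) none) ++ [nums.getD 0 0]

def get_post_order (nums : List Int) : List Int := pvGoA (nums.length + 1) nums

-- ===== PORT B =====
-- 'bound is not None and x > bound'  (bound none = +infinity)
def pvBoundLt (b : Option Int) (x : Int) : Bool :=
  match b with
  | none => false
  | some bv => decide (bv < x)

-- the inner 'while stack and … and x > stack[-1][1]: out.append(stack.pop()[0])' loop; stack top at HEAD
def pvPopsB (x : Int) : List (Int × Option Int) → List Int → List (Int × Option Int) × List Int
  | [], out => ([], out)
  | (r, b) :: rest, out =>
      if pvBoundLt b x then pvPopsB x rest (out ++ [r]) else ((r, b) :: rest, out)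

-- one iteration of the 'for x in nums' loop body
def pvStepB (s : List (Int × Option Int) × List Int) (x : Int) : List (Int × Option Int) × List Int :=
  let p := pvPopsB x s.1 s.2
  let bound : Option Int :=
    match p.1 with
    | [] => none
    | (r, b) :: _ => if r < x then b else some r
  ((x, bound) :: p.1, p.2)

def get_post_order_alt (nums : List Int) : List Int :=
  let q := nums.foldl pvStepB ([], [])
  q.2 ++ q.1.map Prod.fst

-- ===== PRECONDITION & SPEC =====
def Spec_get_post_order (nums : List Int) (out : List Int) : Prop := out = get_post_order_alt nums
instance (nums : List Int) (out : List Int) : Decidable (Spec_get_post_order nums out) := by unfold Spec_get_post_order; infer_instance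

-- ===== CLAIM (what is proved, stated in full; the proofs are below) =====
def Claim_equal_get_post_order : Prop := ∀ (nums : List Int), Dom_get_post_order nums → Spec_get_post_order nums (get_post_order nums)

-- ===== LEMMAS AND PROOFS =====

-- Proof-only reference recursion: pvParse f b s consumes the maximal prefix of s that forms a
-- subtree chain bounded by b and returns (its post-order, the unconsumed rest).
def pvParse : Nat → Option Int → List Int → List Int × List Int
  | 0, _, s => ([], s)
  | _ + 1, _, [] => ([], [])
  | f + 1, b, x :: t =>
    if pvBoundLt b x then ([], x :: t)
    else
      let p1 := pvParse f (some x) t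
      let p2 := pvParse f b p1.2
      (p1.1 ++ p2.1 ++ [x], p2.2)

-- what remains of pvParse under bound b after the root r has already been consumed
def pvPA (f : Nat) (r : Int) (b : Option Int) (s : List Int) : List Int × List Int :=
  ((pvParse f (some r) s).1 ++ (pvParse f b (pvParse f (some r) s).2).1 ++ [r],
   (pvParse f b (pvParse f (some r) s).2).2)

-- B's fold together with the final pop-everything loop, from an arbitrary state
def pvRun (st : List (Int × Option Int)) (out : List Int) (s : List Int) : List Int :=
  ((s.foldl pvStepB (st, out)).2) ++ ((s.foldl pvStepB (st, out)).1).map Prod.fst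

lemma pvParse_nil (f : Nat) (b : Option Int) : pvParse f b [] = ([], []) := by
  cases f <;> rfl

lemma pvParse_stop (f : Nat) (b : Option Int) (y : Int) (t : List Int)
    (h : pvBoundLt b y = true) : pvParse f b (y :: t) = ([], y :: t) := by
  cases f with
  | zero => rfl
  | succ f => simp [pvParse, h]

lemma pvParse_len : ∀ (f : Nat) (b : Option Int) (s : List Int),
    (pvParse f b s).2.length ≤ s.length := by
  intro f
  induction f with
  | zero => intro b s; simp [pvParse]
  | succ f ih =>
    intro b s
    cases s with
    | nil => simp [pvParse]
    | cons x t =>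
      by_cases h : pvBoundLt b x = true
      · simp [pvParse, h]
      · rw [Bool.not_eq_true] at h
        simp only [pvParse, h, Bool.false_eq_true, if_false]
        calc (pvParse f b (pvParse f (some x) t).2).2.length
            ≤ (pvParse f (some x) t).2.length := ih _ _
          _ ≤ t.length := ih _ _
          _ ≤ (x :: t).length := by simp

lemma pvParse_stable : ∀ (f g : Nat) (b : Option Int) (s : List Int),
    s.length ≤ f → s.length ≤ g → pvParse f b s = pvParse g b s := by
  intro f
  induction f with
  | zero =>
    intro g b s hf _
    have : s = [] := List.eq_nil_of_length_eq_zero (Nat.le_zero.mp hf)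
    subst this; rw [pvParse_nil, pvParse_nil]
  | succ f ih =>
    intro g b s hf hg
    cases s with
    | nil => rw [pvParse_nil, pvParse_nil]
    | cons x t =>
      cases g with
      | zero => simp at hg
      | succ g =>
        simp only [List.length_cons, Nat.succ_le_succ_iff] at hf hg
        by_cases h : pvBoundLt b x = true
        · rw [pvParse_stop _ _ _ _ h, pvParse_stop _ _ _ _ h]
        · rw [Bool.not_eq_true] at h
          simp only [pvParse, h, Bool.false_eq_true, if_false]
          have h1 : pvParse f (some x) t = pvParse g (some x) t := ih g _ t hf hg
          rw [h1]
          have h2 : pvParse f b (pvParse g (some x) t).2 = pvParse g b (pvParse g (some x) t).2 := by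
            apply ih g
            · exact le_trans (by rw [← h1]; exact pvParse_len f _ t) hf
            · exact le_trans (pvParse_len g _ t) hg
          rw [h2]

lemma pvParse_none_all : ∀ (f : Nat) (s : List Int), s.length ≤ f →
    (pvParse f none s).2 = [] := by
  intro f
  induction f with
  | zero =>
    intro s hf
    have : s = [] := List.eq_nil_of_length_eq_zero (Nat.le_zero.mp hf)
    subst this; rfl
  | succ f ih =>
    intro s hf
    cases s with
    | nil => rfl
    | cons x t =>
      simp only [List.length_cons, Nat.succ_le_succ_iff] at hf
      simp only [pvParse, pvBoundLt]
      apply ih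
      exact le_trans (pvParse_len f _ t) hf

lemma pvParse_head : ∀ (f : Nat) (b : Option Int) (s : List Int), s.length ≤ f →
    (pvParse f b s).2 = [] ∨ ∃ y t', (pvParse f b s).2 = y :: t' ∧ pvBoundLt b y = true := by
  intro f
  induction f with
  | zero =>
    intro b s hf
    have : s = [] := List.eq_nil_of_length_eq_zero (Nat.le_zero.mp hf)
    subst this; left; rfl
  | succ f ih =>
    intro b s hf
    cases s with
    | nil => left; rfl
    | cons x t =>
      simp only [List.length_cons, Nat.succ_le_succ_iff] at hf
      by_cases h : pvBoundLt b x = true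
      · right; exact ⟨x, t, by rw [pvParse_stop _ _ _ _ h], h⟩
      · rw [Bool.not_eq_true] at h
        simp only [pvParse, h, Bool.false_eq_true, if_false]
        apply ih
        exact le_trans (pvParse_len f _ t) hf

-- the segment law: under bound b, pvParse consumes exactly the maximal all-≤-b prefix,
-- on which it behaves like the unbounded pvParse
lemma pvParse_seg : ∀ (n : Nat) (s : List Int), s.length ≤ n → ∀ (f : Nat) (b : Int), s.length ≤ f →
    pvParse f (some b) s =
      ((pvParse f none (s.takeWhile (fun y => decide (y ≤ b)))).1,
       s.dropWhile (fun y => decide (y ≤ b))) := by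
  intro n
  induction n with
  | zero =>
    intro s hs f b hf
    have : s = [] := List.eq_nil_of_length_eq_zero (Nat.le_zero.mp hs)
    subst this
    simp [pvParse_nil]
  | succ n ih =>
    intro s hs f b hf
    cases s with
    | nil => simp [pvParse_nil]
    | cons x t =>
      by_cases hx : pvBoundLt (some b) x = true
      · have hxb : decide (x ≤ b) = false := by
          simp only [pvBoundLt, decide_eq_true_eq] at hx
          simpa using not_le.mpr hx
        rw [pvParse_stop _ _ _ _ hx]
        simp [hxb, pvParse_nil]
      · rw [Bool.not_eq_true] at hx
        have hxb : decide (x ≤ b) = true := by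
          simp only [pvBoundLt, decide_eq_false_iff_not, not_lt] at hx
          simpa using hx
        cases f with
        | zero => simp at hf
        | succ f =>
          simp only [List.length_cons, Nat.succ_le_succ_iff] at hs hf
          have h1 := ih t hs f x hf
          have hlenv1 : (t.dropWhile (fun y => decide (y ≤ x))).length ≤ t.length :=
            List.length_dropWhile_le _ _
          have h2 := ih (t.dropWhile (fun y => decide (y ≤ x))) (le_trans hlenv1 hs) f b
            (le_trans hlenv1 hf)
          have hall1 : ∀ a ∈ t.takeWhile (fun y => decide (y ≤ x)), (fun y => decide (y ≤ b)) a := by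
            intro a ha
            have hax := List.mem_takeWhile_imp ha
            have hxb' : x ≤ b := of_decide_eq_true hxb
            simp only [decide_eq_true_eq] at hax ⊢
            exact le_trans hax hxb'
          have hall1x : ∀ a ∈ t.takeWhile (fun y => decide (y ≤ x)), (fun y => decide (y ≤ x)) a := by
            intro a ha
            have hax := List.mem_takeWhile_imp ha
            exact hax
          have hu2 : (t.dropWhile (fun y => decide (y ≤ x))).takeWhile (fun y => decide (y ≤ b)) = [] ∨
              ∃ z u2', (t.dropWhile (fun y => decide (y ≤ x))).takeWhile (fun y => decide (y ≤ b)) = z :: u2' ∧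
                (decide (z ≤ x)) = false := by
            cases hv1 : t.dropWhile (fun y => decide (y ≤ x)) with
            | nil => left; simp
            | cons z v1' =>
              have hz : (decide (z ≤ x)) = false := by
                have hh := List.head?_dropWhile_not (fun y => decide (y ≤ x)) t
                rw [hv1] at hh; simpa using hh
              by_cases hzb : (decide (z ≤ b)) = true
              · right; exact ⟨z, v1'.takeWhile (fun y => decide (y ≤ b)), by simp [hzb], hz⟩
              · left; rw [Bool.not_eq_true] at hzb; simp [hzb]
          have htk : ((t.dropWhile (fun y => decide (y ≤ x))).takeWhile (fun y => decide (y ≤ b))).takeWhile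
              (fun y => decide (y ≤ x)) = [] := by
            rcases hu2 with h | ⟨z, u2', h, hz⟩
            · simp [h]
            · simp [h, hz]
          have hdr : ((t.dropWhile (fun y => decide (y ≤ x))).takeWhile (fun y => decide (y ≤ b))).dropWhile
              (fun y => decide (y ≤ x)) =
              (t.dropWhile (fun y => decide (y ≤ x))).takeWhile (fun y => decide (y ≤ b)) := by
            rcases hu2 with h | ⟨z, u2', h, hz⟩
            · simp [h]
            · simp [h, hz]
          have hsplit : t.takeWhile (fun y => decide (y ≤ b)) =
              t.takeWhile (fun y => decide (y ≤ x)) ++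
              (t.dropWhile (fun y => decide (y ≤ x))).takeWhile (fun y => decide (y ≤ b)) := by
            conv_lhs => rw [← List.takeWhile_append_dropWhile (p := fun y => decide (y ≤ x)) (l := t)]
            rw [List.takeWhile_append_of_pos hall1]
          have hdsplit : t.dropWhile (fun y => decide (y ≤ b)) =
              (t.dropWhile (fun y => decide (y ≤ x))).dropWhile (fun y => decide (y ≤ b)) := by
            conv_lhs => rw [← List.takeWhile_append_dropWhile (p := fun y => decide (y ≤ x)) (l := t)]
            rw [List.dropWhile_append_of_pos hall1]
          have hlen12 : (t.takeWhile (fun y => decide (y ≤ x)) ++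
              (t.dropWhile (fun y => decide (y ≤ x))).takeWhile (fun y => decide (y ≤ b))).length ≤ t.length := by
            rw [← hsplit]
            exact (List.takeWhile_prefix _).length_le
          have hq1 := ih (t.takeWhile (fun y => decide (y ≤ x)) ++
              (t.dropWhile (fun y => decide (y ≤ x))).takeWhile (fun y => decide (y ≤ b)))
              (le_trans hlen12 hs) f x (le_trans hlen12 hf)
          rw [List.takeWhile_append_of_pos hall1x, List.dropWhile_append_of_pos hall1x, htk, hdr,
            List.append_nil] at hq1
          have hT : ((x :: t).takeWhile (fun y => decide (y ≤ b))) =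
              x :: (t.takeWhile (fun y => decide (y ≤ x)) ++
                (t.dropWhile (fun y => decide (y ≤ x))).takeWhile (fun y => decide (y ≤ b))) := by
            rw [List.takeWhile_cons, hxb]
            simp [hsplit]
          have hD : ((x :: t).dropWhile (fun y => decide (y ≤ b))) =
              (t.dropWhile (fun y => decide (y ≤ x))).dropWhile (fun y => decide (y ≤ b)) := by
            rw [List.dropWhile_cons, hxb]
            simp [hdsplit]
          have hxf : pvBoundLt (some b) x = false := hx
          have hL : pvParse (f + 1) (some b) (x :: t) =
              ((pvParse f none (t.takeWhile (fun y => decide (y ≤ x)))).1 ++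
               (pvParse f none ((t.dropWhile (fun y => decide (y ≤ x))).takeWhile (fun y => decide (y ≤ b)))).1 ++ [x],
               (t.dropWhile (fun y => decide (y ≤ x))).dropWhile (fun y => decide (y ≤ b))) := by
            simp only [pvParse, hxf, Bool.false_eq_true, if_false]
            rw [h1]
            simp only []
            rw [h2]
          rw [hL, hT, hD]
          refine Prod.ext ?_ rfl
          simp only []
          have hRu : pvParse (f + 1) none
              (x :: (t.takeWhile (fun y => decide (y ≤ x)) ++
                (t.dropWhile (fun y => decide (y ≤ x))).takeWhile (fun y => decide (y ≤ b)))) =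
              ((pvParse f none (t.takeWhile (fun y => decide (y ≤ x)))).1 ++
               (pvParse f none ((t.dropWhile (fun y => decide (y ≤ x))).takeWhile (fun y => decide (y ≤ b)))).1 ++ [x],
               (pvParse f none ((t.dropWhile (fun y => decide (y ≤ x))).takeWhile (fun y => decide (y ≤ b)))).2) := by
            simp only [pvParse, pvBoundLt, Bool.false_eq_true, if_false]
            rw [hq1]
          rw [hRu]

-- characterisation of A's scan loop
lemma pvFindGtA_spec : ∀ (nums : List Int) (i : Nat),
    pvFindGtA nums i =
      (if ((nums.drop i).takeWhile (fun y => decide (y ≤ nums.getD 0 0))).length = (nums.drop i).length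
       then none
       else some (i + ((nums.drop i).takeWhile (fun y => decide (y ≤ nums.getD 0 0))).length)) := by
  intro nums
  suffices H : ∀ (k i : Nat), nums.length - i ≤ k →
      pvFindGtA nums i =
      (if ((nums.drop i).takeWhile (fun y => decide (y ≤ nums.getD 0 0))).length = (nums.drop i).length
       then none
       else some (i + ((nums.drop i).takeWhile (fun y => decide (y ≤ nums.getD 0 0))).length)) by
    intro i; exact H nums.length i (by omega)
  intro k
  induction k with
  | zero =>
    intro i hi
    have hge : nums.length ≤ i := by omega
    rw [pvFindGtA, dif_neg (by omega : ¬ i < nums.length)]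
    simp [List.drop_eq_nil_of_le hge]
  | succ k ihk =>
    intro i hi
    by_cases h : i < nums.length
    · have hdrop : nums.drop i = nums[i] :: nums.drop (i + 1) := List.drop_eq_getElem_cons h
      have hgd : nums.getD i 0 = nums[i] := List.getD_eq_getElem nums 0 h
      rw [pvFindGtA, dif_pos h]
      by_cases hc : nums.getD 0 0 < nums.getD i 0
      · rw [if_pos hc]
        have hle : decide (nums[i] ≤ nums.getD 0 0) = false := by
          rw [hgd] at hc; simpa using not_le.mpr hc
        rw [hdrop]
        simp only [List.takeWhile_cons, hle, Bool.false_eq_true, if_false,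
          List.length_nil, List.length_cons]
        rw [if_neg (by omega), Nat.add_zero]
      · rw [if_neg hc]
        rw [ihk (i + 1) (by omega)]
        have hle : decide (nums[i] ≤ nums.getD 0 0) = true := by
          rw [hgd] at hc; simpa using not_lt.mp hc
        rw [hdrop]
        simp only [List.takeWhile_cons, hle, if_true, List.length_cons]
        by_cases hEq : ((nums.drop (i + 1)).takeWhile (fun y => decide (y ≤ nums.getD 0 0))).length =
            (nums.drop (i + 1)).length
        · rw [if_pos hEq, if_pos (by omega)]
        · rw [if_neg hEq, if_neg (by omega)]
          congr 1
          omega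
    · rw [pvFindGtA, dif_neg h]
      simp [List.drop_eq_nil_of_le (by omega : nums.length ≤ i)]

-- A computes the unbounded pvParse
lemma pvGoA_char : ∀ (f : Nat) (s : List Int), s.length < f →
    pvGoA f s = (pvParse s.length none s).1 := by
  intro f
  induction f with
  | zero => intro s h; omega
  | succ f ih =>
    intro s hlen
    by_cases hs : s.length ≤ 1
    · cases s with
      | nil => simp [pvGoA, pvParse_nil]
      | cons x t =>
        have ht : t = [] := by
          cases t with
          | nil => rfl
          | cons y t' => simp at hs
        subst ht
        simp [pvGoA, pvParse, pvBoundLt]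
    · rw [not_le] at hs
      obtain ⟨x, t, rfl⟩ : ∃ x t, s = x :: t := by
        cases s with
        | nil => simp at hs
        | cons x t => exact ⟨x, t, rfl⟩
      have ht1 : 1 ≤ t.length := by simpa using hs
      have hnot : ¬ ((x :: t).length ≤ 1) := by simp only [List.length_cons]; omega
      rw [pvGoA.eq_def]
      simp only []
      rw [if_neg hnot]
      have hfind := pvFindGtA_spec (x :: t) 1
      have hdrop1 : (x :: t).drop 1 = t := rfl
      have hget0 : (x :: t).getD 0 0 = x := rfl
      rw [hdrop1, hget0] at hfind
      have hseg := pvParse_seg t.length t le_rfl t.length x le_rfl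
      have huv := List.takeWhile_append_dropWhile (p := fun y => decide (y ≤ x)) (l := t)
      -- the parse target unfolded once
      have hPtop : pvParse (x :: t).length none (x :: t) =
          ((pvParse t.length (some x) t).1 ++
           (pvParse t.length none (pvParse t.length (some x) t).2).1 ++ [x],
           (pvParse t.length none (pvParse t.length (some x) t).2).2) := by
        simp only [List.length_cons, pvParse, pvBoundLt, Bool.false_eq_true, if_false]
      by_cases hc : (t.takeWhile (fun y => decide (y ≤ x))).length = t.length
      · rw [if_pos hc] at hfind
        rw [hfind]
        simp only []
        have hut : t.takeWhile (fun y => decide (y ≤ x)) = t :=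
          List.IsPrefix.eq_of_length (List.takeWhile_prefix _) hc
        have hvnil : t.dropWhile (fun y => decide (y ≤ x)) = [] := by
          have h3 := congrArg List.length huv
          rw [List.length_append, hc] at h3
          exact List.eq_nil_of_length_eq_zero (by omega)
        rw [PySem.List.slice_from_one]
        show pvGoA f t ++ [x] = (pvParse (x :: t).length none (x :: t)).1
        have hlen' : t.length < f := by simp only [List.length_cons] at hlen; omega
        rw [ih t hlen', hPtop]
        rw [hseg, hut, hvnil]
        simp [pvParse_nil]
      · rw [if_neg hc] at hfind
        rw [hfind]
        simp only []
        have hulen : (t.takeWhile (fun y => decide (y ≤ x))).length ≤ t.length :=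
          (List.takeWhile_prefix _).length_le
        have hvlen : (t.dropWhile (fun y => decide (y ≤ x))).length ≤ t.length :=
          List.length_dropWhile_le _ _
        have hs1 : PySem.List.slice (x :: t) (some ((1 + (t.takeWhile (fun y => decide (y ≤ x))).length : Nat) : Int))
            none = t.dropWhile (fun y => decide (y ≤ x)) := by
          rw [PySem.List.slice_from _ (by omega)]
          have : ((1 + (t.takeWhile (fun y => decide (y ≤ x))).length : Nat) : Int).toNat =
              1 + (t.takeWhile (fun y => decide (y ≤ x))).length := by omega
          rw [this]
          show (x :: t).drop (1 + (t.takeWhile (fun y => decide (y ≤ x))).length) = _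
          rw [show (1 + (t.takeWhile (fun y => decide (y ≤ x))).length) =
            (t.takeWhile (fun y => decide (y ≤ x))).length + 1 by omega]
          show t.drop (t.takeWhile (fun y => decide (y ≤ x))).length = _
          have hdl := List.drop_left (l₁ := t.takeWhile (fun y => decide (y ≤ x)))
            (l₂ := t.dropWhile (fun y => decide (y ≤ x)))
          rw [huv] at hdl
          exact hdl
        have hs2 : PySem.List.slice (x :: t) (some 1)
            (some ((1 + (t.takeWhile (fun y => decide (y ≤ x))).length : Nat) : Int)) =
            t.takeWhile (fun y => decide (y ≤ x)) := by
          rw [PySem.List.slice_toNat _ (by omega) (by omega)]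
          have h1 : ((1 : Int)).toNat = 1 := rfl
          have h2 : ((1 + (t.takeWhile (fun y => decide (y ≤ x))).length : Nat) : Int).toNat =
              1 + (t.takeWhile (fun y => decide (y ≤ x))).length := by omega
          rw [h1, h2]
          show ((x :: t).drop 1).take (1 + (t.takeWhile (fun y => decide (y ≤ x))).length - 1) = _
          rw [hdrop1, show 1 + (t.takeWhile (fun y => decide (y ≤ x))).length - 1 =
            (t.takeWhile (fun y => decide (y ≤ x))).length by omega]
          exact ((List.prefix_iff_eq_take).mp (List.takeWhile_prefix _)).symm
        rw [hs1, hs2]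
        have hlen' : t.length < f := by simp only [List.length_cons] at hlen; omega
        rw [ih _ (lt_of_le_of_lt hulen hlen'), ih _ (lt_of_le_of_lt hvlen hlen')]
        rw [hPtop, hseg]
        simp only []
        rw [pvParse_stable t.length (t.takeWhile (fun y => decide (y ≤ x))).length none _ hulen le_rfl,
            pvParse_stable t.length (t.dropWhile (fun y => decide (y ≤ x))).length none _ hvlen le_rfl]
        simp

lemma pvRun_nil (st : List (Int × Option Int)) (out : List Int) :
    pvRun st out [] = out ++ st.map Prod.fst := rfl

lemma pvRun_cons (st : List (Int × Option Int)) (out : List Int) (x : Int) (t : List Int) :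
    pvRun st out (x :: t) = pvRun (pvStepB (st, out) x).1 (pvStepB (st, out) x).2 t := rfl

lemma pvStepB_pop (x r : Int) (b : Option Int) (st : List (Int × Option Int)) (out : List Int)
    (hx : pvBoundLt b x = true) :
    pvStepB ((r, b) :: st, out) x = pvStepB (st, out ++ [r]) x := by
  simp only [pvStepB]
  rw [show pvPopsB x ((r, b) :: st) out = pvPopsB x st (out ++ [r]) by simp [pvPopsB, hx]]

lemma pvStepB_nopop (x r : Int) (b : Option Int) (st : List (Int × Option Int)) (out : List Int)
    (hx : pvBoundLt b x = false) :
    pvStepB ((r, b) :: st, out) x = ((x, if r < x then b else some r) :: (r, b) :: st, out) := by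
  simp [pvStepB, pvPopsB, hx]

lemma pvStepB_emp (x : Int) (out : List Int) :
    pvStepB (([] : List (Int × Option Int)), out) x = ([(x, none)], out) := by
  simp [pvStepB, pvPopsB]

lemma pvBoundLt_trans (b : Option Int) (r y : Int) (h1 : pvBoundLt b y = true)
    (h2 : pvBoundLt b r = false) : pvBoundLt (some r) y = true := by
  cases b with
  | none => simp [pvBoundLt] at h1
  | some bv => simp [pvBoundLt] at h1 h2 ⊢; omega

lemma pvParse_of_stopped (f : Nat) (b : Option Int) (s : List Int)
    (h : s = [] ∨ ∃ y t', s = y :: t' ∧ pvBoundLt b y = true) : pvParse f b s = ([], s) := by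
  rcases h with rfl | ⟨y, t', rfl, hy⟩
  · exact pvParse_nil f b
  · exact pvParse_stop f b y t' hy

lemma pvPA_nil (f : Nat) (r : Int) (b : Option Int) : pvPA f r b [] = ([r], []) := by
  simp [pvPA, pvParse_nil]

lemma pvPA_stop (f : Nat) (r : Int) (b : Option Int) (x : Int) (t : List Int)
    (hx : pvBoundLt b x = true) (hrb : pvBoundLt b r = false) :
    pvPA f r b (x :: t) = ([r], x :: t) := by
  have hrx := pvBoundLt_trans b r x hx hrb
  simp [pvPA, pvParse_stop _ _ _ _ hrx, pvParse_stop _ _ _ _ hx]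

lemma pvPA_of_stopped (f : Nat) (r : Int) (b : Option Int) (s : List Int)
    (h : s = [] ∨ ∃ y t', s = y :: t' ∧ pvBoundLt b y = true)
    (hrb : pvBoundLt b r = false) : pvPA f r b s = ([r], s) := by
  rcases h with rfl | ⟨y, t', rfl, hy⟩
  · exact pvPA_nil f r b
  · exact pvPA_stop f r b y t' hy hrb

-- consuming x with x ≤ r starts the left subtree of r: pvPA composes
lemma pvPA_step_le (f : Nat) (r x : Int) (b : Option Int) (t : List Int)
    (hf : t.length + 1 ≤ f) (hxr : x ≤ r) :
    pvPA f r b (x :: t) =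
      ((pvPA f x (some r) t).1 ++ (pvPA f r b ((pvPA f x (some r) t).2)).1,
       (pvPA f r b ((pvPA f x (some r) t).2)).2) := by
  obtain ⟨f₀, rfl⟩ : ∃ f₀, f = f₀ + 1 := ⟨f - 1, by omega⟩
  have hxrf : pvBoundLt (some r) x = false := by simp [pvBoundLt]; omega
  have htf : t.length ≤ f₀ := by omega
  have hP1 : pvParse (f₀ + 1) (some r) (x :: t) = pvPA (f₀ + 1) x (some r) t := by
    simp only [pvParse, hxrf, Bool.false_eq_true, if_false, pvPA]
    rw [pvParse_stable f₀ (f₀ + 1) (some x) t htf (by omega)]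
    rw [pvParse_stable f₀ (f₀ + 1) (some r) _
      (le_trans (pvParse_len _ _ _) htf) (le_trans (pvParse_len _ _ _) (by omega))]
  have hstop : (pvPA (f₀ + 1) x (some r) t).2 = [] ∨
      ∃ y t', (pvPA (f₀ + 1) x (some r) t).2 = y :: t' ∧ pvBoundLt (some r) y = true := by
    have hh := pvParse_head (f₀ + 1) (some r) ((pvParse (f₀ + 1) (some x) t).2)
      (le_trans (pvParse_len _ _ _) (by omega))
    simpa [pvPA] using hh
  have hR1 : pvParse (f₀ + 1) (some r) ((pvPA (f₀ + 1) x (some r) t).2) =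
      ([], (pvPA (f₀ + 1) x (some r) t).2) := pvParse_of_stopped _ _ _ hstop
  have hPA2 : pvPA (f₀ + 1) r b ((pvPA (f₀ + 1) x (some r) t).2) =
      ((pvParse (f₀ + 1) b ((pvPA (f₀ + 1) x (some r) t).2)).1 ++ [r],
       (pvParse (f₀ + 1) b ((pvPA (f₀ + 1) x (some r) t).2)).2) := by
    show ((pvParse _ (some r) _).1 ++ (pvParse _ b (pvParse _ (some r) _).2).1 ++ [r],
          (pvParse _ b (pvParse _ (some r) _).2).2) = _
    rw [hR1]
    simp
  show ((pvParse (f₀ + 1) (some r) (x :: t)).1 ++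
        (pvParse (f₀ + 1) b (pvParse (f₀ + 1) (some r) (x :: t)).2).1 ++ [r],
        (pvParse (f₀ + 1) b (pvParse (f₀ + 1) (some r) (x :: t)).2).2) = _
  rw [hP1, hPA2]
  simp

-- consuming x with r < x ≤ b closes the left subtree of r and continues its right chain
lemma pvPA_step_gt (f : Nat) (r x : Int) (b : Option Int) (t : List Int)
    (hf : t.length + 1 ≤ f) (hrx : r < x) (hxb : pvBoundLt b x = false)
    (hrb : pvBoundLt b r = false) :
    pvPA f r b (x :: t) =
      ((pvPA f x b t).1 ++ (pvPA f r b ((pvPA f x b t).2)).1,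
       (pvPA f r b ((pvPA f x b t).2)).2) := by
  obtain ⟨f₀, rfl⟩ : ∃ f₀, f = f₀ + 1 := ⟨f - 1, by omega⟩
  have hrxT : pvBoundLt (some r) x = true := by simp [pvBoundLt]; omega
  have htf : t.length ≤ f₀ := by omega
  have hP1 : pvParse (f₀ + 1) (some r) (x :: t) = ([], x :: t) := pvParse_stop _ _ _ _ hrxT
  have hP2 : pvParse (f₀ + 1) b (x :: t) = pvPA (f₀ + 1) x b t := by
    simp only [pvParse, hxb, Bool.false_eq_true, if_false, pvPA]
    rw [pvParse_stable f₀ (f₀ + 1) (some x) t htf (by omega)]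
    rw [pvParse_stable f₀ (f₀ + 1) b _
      (le_trans (pvParse_len _ _ _) htf) (le_trans (pvParse_len _ _ _) (by omega))]
  have hstop : (pvPA (f₀ + 1) x b t).2 = [] ∨
      ∃ y t', (pvPA (f₀ + 1) x b t).2 = y :: t' ∧ pvBoundLt b y = true := by
    have hh := pvParse_head (f₀ + 1) b ((pvParse (f₀ + 1) (some x) t).2)
      (le_trans (pvParse_len _ _ _) (by omega))
    simpa [pvPA] using hh
  have hPA2 : pvPA (f₀ + 1) r b ((pvPA (f₀ + 1) x b t).2) = ([r], (pvPA (f₀ + 1) x b t).2) :=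
    pvPA_of_stopped _ _ _ _ hstop hrb
  show ((pvParse (f₀ + 1) (some r) (x :: t)).1 ++
        (pvParse (f₀ + 1) b (pvParse (f₀ + 1) (some r) (x :: t)).2).1 ++ [r],
        (pvParse (f₀ + 1) b (pvParse (f₀ + 1) (some r) (x :: t)).2).2) = _
  rw [hP1]
  simp only []
  rw [hP2, hPA2]
  simp

-- the stack invariant: a stack entry (r, b) stands for a pending pvPA r b computation
lemma pvRun_inv : ∀ (n : Nat) (s : List Int), s.length ≤ n →
    ∀ (f : Nat) (st : List (Int × Option Int)) (r : Int) (b : Option Int) (out : List Int),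
      s.length ≤ f → pvBoundLt b r = false →
      pvRun ((r, b) :: st) out s = pvRun st (out ++ (pvPA f r b s).1) ((pvPA f r b s).2) := by
  intro n
  induction n with
  | zero =>
    intro s hs f st r b out hf hrb
    have : s = [] := List.eq_nil_of_length_eq_zero (Nat.le_zero.mp hs)
    subst this
    rw [pvPA_nil, pvRun_nil, pvRun_nil]
    simp
  | succ n ih =>
    intro s hs f st r b out hf hrb
    cases s with
    | nil =>
      rw [pvPA_nil, pvRun_nil, pvRun_nil]
      simp
    | cons x t =>
      simp only [List.length_cons, Nat.succ_le_succ_iff] at hs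
      simp only [List.length_cons] at hf
      by_cases hx : pvBoundLt b x = true
      · rw [pvRun_cons, pvStepB_pop x r b st out hx, ← pvRun_cons,
          pvPA_stop f r b x t hx hrb]
      · rw [Bool.not_eq_true] at hx
        by_cases hxr : r < x
        · have hsb : pvStepB ((r, b) :: st, out) x = ((x, b) :: (r, b) :: st, out) := by
            rw [pvStepB_nopop _ _ _ _ _ hx, if_pos hxr]
          rw [pvRun_cons, hsb]
          simp only []
          rw [ih t hs f ((r, b) :: st) x b out (by omega) hx]
          have hlen2 : (pvPA f x b t).2.length ≤ t.length :=
            le_trans (pvParse_len _ _ _) (pvParse_len _ _ _)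
          rw [ih ((pvPA f x b t).2) (le_trans hlen2 hs) f st r b
            (out ++ (pvPA f x b t).1) (le_trans hlen2 (by omega)) hrb]
          rw [pvPA_step_gt f r x b t (by omega) hxr hx hrb]
          simp [List.append_assoc]
        · rw [not_lt] at hxr
          have hxrf : pvBoundLt (some r) x = false := by simp [pvBoundLt]; omega
          have hsb : pvStepB ((r, b) :: st, out) x = ((x, some r) :: (r, b) :: st, out) := by
            rw [pvStepB_nopop _ _ _ _ _ hx, if_neg (not_lt.mpr hxr)]
          rw [pvRun_cons, hsb]
          simp only []
          rw [ih t hs f ((r, b) :: st) x (some r) out (by omega) hxrf]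
          have hlen2 : (pvPA f x (some r) t).2.length ≤ t.length :=
            le_trans (pvParse_len _ _ _) (pvParse_len _ _ _)
          rw [ih ((pvPA f x (some r) t).2) (le_trans hlen2 hs) f st r b
            (out ++ (pvPA f x (some r) t).1) (le_trans hlen2 (by omega)) hrb]
          rw [pvPA_step_le f r x b t (by omega) hxr]
          simp [List.append_assoc]

-- B computes the unbounded pvParse
lemma pvRun_empty (s : List Int) (out : List Int) :
    pvRun [] out s = out ++ (pvParse s.length none s).1 := by
  cases s with
  | nil => rw [pvRun_nil, pvParse_nil]; simp
  | cons x t =>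
    rw [pvRun_cons, pvStepB_emp]
    simp only []
    rw [pvRun_inv t.length t le_rfl t.length [] x none out le_rfl rfl]
    have h2 : (pvPA t.length x none t).2 = [] :=
      pvParse_none_all t.length _ (pvParse_len _ _ _)
    rw [h2, pvRun_nil]
    have hP : pvParse (x :: t).length none (x :: t) = pvPA t.length x none t := by
      simp only [List.length_cons, pvParse, pvBoundLt, Bool.false_eq_true, if_false, pvPA]
    rw [hP]
    simp

-- ===== VERDICT (by name: the statement is the Claim_ definition above) =====
theorem get_post_order_spec : Claim_equal_get_post_order := by
  intro nums _
  show get_post_order nums = get_post_order_alt nums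
  have hA : get_post_order nums = (pvParse nums.length none nums).1 :=
    pvGoA_char (nums.length + 1) nums (Nat.lt_succ_self _)
  have hB : get_post_order_alt nums = pvRun [] [] nums := rfl
  rw [hA, hB, pvRun_empty]
  simp
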